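-- pv_equiv track=rewrite | github.com/amarnath-atyam/Problems- | Program-4.py | count_of_multiples
-- ===== SOURCE A (Python) =====
-- def count_of_multiples(numbers):
--     result = {}
--     for i in range(1, 10):
--         count = 0
--         for num in numbers:
--             if num % i == 0:
--                 count += 1
--         result[i] = count
--     return result
-- ===== SOURCE B (Python) =====
-- def count_of_multiples(numbers):
--     # Residue-histogram algorithm: divisibility by any i in 1..9 depends only on
--     # num % 2520 (lcm(1..9) = 2520).  Build a frequency table of residues in one
--     # pass (one modulo per element), then for each i sum the frequencies of the
--     # multiples of i below 2520 -- constant work independent of len(numbers).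
--     freq = {}
--     for num in numbers:
--         r = num % 2520
--         freq[r] = freq.get(r, 0) + 1
--     result = {}
--     for i in range(1, 10):
--         total = 0
--         for m in range(0, 2520, i):
--             total += freq.get(m, 0)
--         result[i] = total
--     return result
-- ===== Notes on version B (the rewrite author's own statement) =====
-- stated objective: faster
-- what changed: Replaces the nine scans of the list by a residue-histogram algorithm: one pass builds a frequency table of num % 2520 (lcm of 1..9), then each count is a constant-size sum of frequencies over the multiples of i below 2520, so only one modulo is computed per element.
import Mathlib
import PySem

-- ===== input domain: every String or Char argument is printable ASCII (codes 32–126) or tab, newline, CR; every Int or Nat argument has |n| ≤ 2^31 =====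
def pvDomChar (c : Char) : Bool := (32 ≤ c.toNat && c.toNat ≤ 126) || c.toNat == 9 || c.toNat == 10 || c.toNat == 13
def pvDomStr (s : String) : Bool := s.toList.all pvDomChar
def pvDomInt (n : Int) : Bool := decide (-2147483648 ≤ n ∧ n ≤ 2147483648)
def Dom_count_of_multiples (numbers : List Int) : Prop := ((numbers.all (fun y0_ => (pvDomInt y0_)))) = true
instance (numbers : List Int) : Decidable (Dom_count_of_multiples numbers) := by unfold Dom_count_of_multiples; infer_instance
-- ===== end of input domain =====

-- B replaces A's nine scans of the list by a residue histogram of num % 2520 (lcm 1..9) built in one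
-- pass, then constant-size sums over the multiples of each i below 2520 (measured faster at large sizes).


-- ===== PORT A =====
-- A: for each i in 1..9, scan `numbers` counting multiples of i, then result[i] = count.
def count_of_multiples (numbers : List Int) : List (Int × Int) :=
  ((PySem.List.pyRange 1 10 1).foldl
    (fun result i =>
      result.insert i
        (numbers.foldl (fun count num =>
          if PySem.Int.mod num i = 0 then count + 1 else count) (0 : Int)))
    (PySem.Dict.empty : PySem.Dict Int Int)).items

-- ===== PORT B =====
-- B: freq = histogram of num % 2520; result[i] = sum of freq over multiples of i below 2520.
def count_of_multiples_alt (numbers : List Int) : List (Int × Int) :=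
  let freq := numbers.foldl
    (fun freq num =>
      let r := PySem.Int.mod num 2520
      freq.insert r (freq.getD r 0 + 1))
    (PySem.Dict.empty : PySem.Dict Int Int)
  ((PySem.List.pyRange 1 10 1).foldl
    (fun result i =>
      result.insert i
        ((PySem.List.pyRange 0 2520 i).foldl
          (fun total m => total + freq.getD m 0) (0 : Int)))
    (PySem.Dict.empty : PySem.Dict Int Int)).items

-- ===== PRECONDITION & SPEC =====
def Spec_count_of_multiples (numbers : List Int) (out : List (Int × Int)) : Prop := out = count_of_multiples_alt numbers
instance (numbers : List Int) (out : List (Int × Int)) : Decidable (Spec_count_of_multiples numbers out) := by unfold Spec_count_of_multiples; infer_instance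

-- ===== CLAIM (what is proved, stated in full; the proofs are below) =====
def Claim_equal_count_of_multiples : Prop := ∀ (numbers : List Int), Dom_count_of_multiples numbers → Spec_count_of_multiples numbers (count_of_multiples numbers)

-- ===== LEMMAS AND PROOFS =====

-- step > 1 ranges have no duplicates (pyRange with positive step is an injective map of range)
lemma pv_nodup {i : Int} (a b : Int) (hi : 0 < i) : (PySem.List.pyRange a b i).Nodup := by
  rw [PySem.List.pyRange_of_pos a b hi]
  refine (List.nodup_range).map ?_
  intro x y h
  have h2 : i * (x:Int) = i * y := by
    have := add_left_cancel h
    simpa using this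
  have h3 := mul_left_cancel₀ (by omega : (i:Int) ≠ 0) h2
  exact_mod_cast h3

-- sum of residue-list counts over a Nodup list L = how many residues land in L
lemma pv_sum_count (L : List Int) (hL : L.Nodup) (rs : List Int) :
    (L.map (fun m => (rs.count m : Int))).sum = (rs.countP (fun r => decide (r ∈ L)) : Int) := by
  induction rs with
  | nil => simp
  | cons r t ih =>
      have h1 : (L.map (fun m => ((r :: t).count m : Int))).sum
          = (L.map (fun m => (t.count m : Int))).sum
            + (L.map (fun m => if (m == r) = true then (1:Int) else 0)).sum := by
        rw [← PySem.List.sum_map_add_int]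
        apply congrArg List.sum
        apply List.map_congr_left
        intro m _
        by_cases h : m = r
        · simp [h]
        · have hr : ¬ r = m := fun hh => h hh.symm
          simp [h, hr]
      have h2 : (L.map (fun m => if (m == r) = true then (1:Int) else 0)).sum
          = (if r ∈ L then (1:Int) else 0) := by
        rw [PySem.List.sum_map_ite_one_zero]
        have hc : L.countP (fun m => m == r) = L.count r := by
          simp [List.count_eq_countP]
        by_cases h : r ∈ L
        · rw [hc, List.count_eq_one_of_mem hL h]; simp [h]
        · rw [hc, List.count_eq_zero.mpr h]; simp [h]
      rw [h1, ih, h2, List.countP_cons]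
      by_cases h : r ∈ L <;> simp [h]

-- for 0 < i dividing 2520: num is a multiple of i iff num % 2520 lies in range(0, 2520, i)
lemma pv_mem_iff (i num : Int) (hi : 0 < i) (hdvd : i ∣ 2520) :
    (PySem.Int.mod num 2520 ∈ PySem.List.pyRange 0 2520 i) ↔ PySem.Int.mod num i = 0 := by
  rw [PySem.List.mem_pyRange_iff_of_pos hi, PySem.Int.mod_eq_zero_iff_dvd]
  have h0 : (0:Int) < 2520 := by norm_num
  have hnn := PySem.Int.mod_nonneg num h0
  have hlt := PySem.Int.mod_lt num h0
  have hdecomp := PySem.Int.floordiv_mul_add_mod num 2520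
  constructor
  · rintro ⟨-, -, hdvd'⟩
    have : i ∣ PySem.Int.mod num 2520 := by simpa using hdvd'
    have hq : i ∣ PySem.Int.floordiv num 2520 * 2520 := Dvd.dvd.mul_left hdvd _
    calc i ∣ PySem.Int.floordiv num 2520 * 2520 + PySem.Int.mod num 2520 := dvd_add hq this
      _ = num := hdecomp
  · intro hn
    refine ⟨hnn, hlt, ?_⟩
    have hq : i ∣ PySem.Int.floordiv num 2520 * 2520 := Dvd.dvd.mul_left hdvd _
    have : i ∣ PySem.Int.mod num 2520 := by
      have := (Int.dvd_add_right hq).mp (hdecomp ▸ hn)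
      exact this
    simpa using this

-- the per-divisor equality: A's scan count = B's frequency sum
lemma pv_col (numbers : List Int) (i : Int) (hi : 0 < i) (hdvd : i ∣ 2520) :
    numbers.foldl (fun count num => if PySem.Int.mod num i = 0 then count + 1 else count) (0 : Int)
      = (PySem.List.pyRange 0 2520 i).foldl
          (fun total m =>
            total + (numbers.foldl
              (fun freq num =>
                let r := PySem.Int.mod num 2520
                freq.insert r (freq.getD r 0 + 1))
              (PySem.Dict.empty : PySem.Dict Int Int)).getD m 0) (0 : Int) := by
  have hfreq : ∀ m : Int,
      (numbers.foldl
        (fun freq num =>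
          let r := PySem.Int.mod num 2520
          freq.insert r (freq.getD r 0 + 1))
        (PySem.Dict.empty : PySem.Dict Int Int)).getD m 0
      = ((numbers.map (fun n => PySem.Int.mod n 2520)).count m : Int) := by
    intro m
    have : numbers.foldl
        (fun freq num =>
          let r := PySem.Int.mod num 2520
          freq.insert r (freq.getD r 0 + 1))
        (PySem.Dict.empty : PySem.Dict Int Int)
      = (numbers.map (fun n => PySem.Int.mod n 2520)).foldl
          (fun d x => d.insert x (d.getD x 0 + 1)) (PySem.Dict.empty : PySem.Dict Int Int) := by
      rw [List.foldl_map]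
    rw [this, PySem.Dict.getD_foldl_insert_add_one]
    simp
  rw [PySem.List.foldl_ite_add_one, PySem.List.foldl_add]
  simp only [hfreq, zero_add]
  rw [pv_sum_count _ (pv_nodup 0 2520 hi) _]
  rw [List.countP_map]
  congr 1
  apply List.countP_congr
  intro n _
  simp only [Function.comp_apply]
  simp only [decide_eq_true_eq]
  exact (pv_mem_iff i n hi hdvd).symm

-- ===== VERDICT (by name: the statement is the Claim_ definition above) =====
set_option maxHeartbeats 1000000 in
theorem count_of_multiples_spec : Claim_equal_count_of_multiples := by
  intro numbers _
  show count_of_multiples numbers = count_of_multiples_alt numbers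
  unfold count_of_multiples count_of_multiples_alt
  simp only [show PySem.List.pyRange 1 10 1 = [1,2,3,4,5,6,7,8,9] from rfl, List.foldl]
  rw [pv_col numbers 1 (by norm_num) (by norm_num), pv_col numbers 2 (by norm_num) (by norm_num),
      pv_col numbers 3 (by norm_num) (by norm_num), pv_col numbers 4 (by norm_num) (by norm_num),
      pv_col numbers 5 (by norm_num) (by norm_num), pv_col numbers 6 (by norm_num) (by norm_num),
      pv_col numbers 7 (by norm_num) (by norm_num), pv_col numbers 8 (by norm_num) (by norm_num),
      pv_col numbers 9 (by norm_num) (by norm_num)]
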